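-- pv_equiv track=rewrite | github.com/seo-jio/coding_test | 고급문제 해결/_다양한_알고리즘__두_여왕.1649933242483/Main.py | countDiagonal
-- ===== SOURCE A (Python) =====
-- def countDiagonal(row, col, n): #현재 q1과 겹치는 대각선의 개수를 세어준다.
--     count = 0
--     x, y = row, col
--     while x < n-1 and y > 0:  #왼쪽 밑의 대각선의 개수 구하기
--         x += 1
--         y -= 1
--         count += 1
--
--     x, y = row, col
--     while x < n-1 and y < n-1:  #오른쪽 밑의 대각선의 개수 구하기
--         x += 1
--         y += 1
--         count += 1
--     return count
-- ===== SOURCE B (Python) =====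
-- def countDiagonal(row, col, n):
--     down = n - 1 - row
--     return max(0, min(down, col)) + max(0, min(down, n - 1 - col))
-- ===== Notes on version B (the rewrite author's own statement) =====
-- stated objective: simpler
-- what changed: Replaced the two step-by-step diagonal-walking loops with a closed-form expression max(0,min(n-1-row,col)) + max(0,min(n-1-row,n-1-col)).
import Mathlib
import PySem

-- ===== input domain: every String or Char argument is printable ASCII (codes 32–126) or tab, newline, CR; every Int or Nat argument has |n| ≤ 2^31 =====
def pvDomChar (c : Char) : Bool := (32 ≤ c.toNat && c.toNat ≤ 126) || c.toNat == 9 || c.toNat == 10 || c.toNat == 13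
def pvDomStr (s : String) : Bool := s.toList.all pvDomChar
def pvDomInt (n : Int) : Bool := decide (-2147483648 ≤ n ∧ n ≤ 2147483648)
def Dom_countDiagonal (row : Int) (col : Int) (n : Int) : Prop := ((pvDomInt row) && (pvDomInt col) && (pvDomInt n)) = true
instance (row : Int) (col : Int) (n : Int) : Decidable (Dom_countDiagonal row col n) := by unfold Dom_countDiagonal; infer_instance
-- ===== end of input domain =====

-- B replaces A's two step-by-step walking loops with a closed-form min/max expression (objective: simpler).

-- ===== PORT A =====
-- first while loop: while x < n-1 and y > 0: x += 1; y -= 1; count += 1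
def pvLoop1 (x y count n : Int) : Int :=
  if x < n - 1 ∧ y > 0 then pvLoop1 (x + 1) (y - 1) (count + 1) n else count
termination_by y.toNat
decreasing_by omega

-- second while loop: while x < n-1 and y < n-1: x += 1; y += 1; count += 1
def pvLoop2 (x y count n : Int) : Int :=
  if x < n - 1 ∧ y < n - 1 then pvLoop2 (x + 1) (y + 1) (count + 1) n else count
termination_by (n - 1 - x).toNat
decreasing_by omega

def countDiagonal (row : Int) (col : Int) (n : Int) : Int :=
  pvLoop2 row col (pvLoop1 row col 0 n) n

-- ===== PORT B =====
def countDiagonal_alt (row : Int) (col : Int) (n : Int) : Int :=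
  max 0 (min (n - 1 - row) col) + max 0 (min (n - 1 - row) (n - 1 - col))

-- ===== PRECONDITION & SPEC =====
def Spec_countDiagonal (row : Int) (col : Int) (n : Int) (out : Int) : Prop := out = countDiagonal_alt row col n
instance (row : Int) (col : Int) (n : Int) (out : Int) : Decidable (Spec_countDiagonal row col n out) := by unfold Spec_countDiagonal; infer_instance

-- ===== CLAIM (what is proved, stated in full; the proofs are below) =====
def Claim_equal_countDiagonal : Prop := ∀ (row : Int) (col : Int) (n : Int), Dom_countDiagonal row col n → Spec_countDiagonal row col n (countDiagonal row col n)

-- ===== LEMMAS AND PROOFS =====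
theorem pvLoop1_eq (x y count n : Int) :
    pvLoop1 x y count n = count + max 0 (min (n - 1 - x) y) := by
  fun_induction pvLoop1 x y count n with
  | case1 x y count h ih => rw [ih]; omega
  | case2 x y count h => omega

theorem pvLoop2_eq (x y count n : Int) :
    pvLoop2 x y count n = count + max 0 (min (n - 1 - x) (n - 1 - y)) := by
  fun_induction pvLoop2 x y count n with
  | case1 x y count h ih => rw [ih]; omega
  | case2 x y count h => omega

-- ===== VERDICT (by name: the statement is the Claim_ definition above) =====
theorem countDiagonal_spec : Claim_equal_countDiagonal := by
  intro row col n _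
  unfold Spec_countDiagonal countDiagonal countDiagonal_alt
  rw [pvLoop1_eq, pvLoop2_eq]
  omega
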